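-- pv_equiv track=rewrite | github.com/CISPA-SysSec/mua_fuzzer_bench | src/mua_fuzzer_benchmark/eval.py | load_call_graph
-- ===== SOURCE A (Python) =====
-- from typing import Any, Callable, Dict, Generator, List, Set, Optional, Tuple, Union, cast
--
-- callgraph_type_todo = Dict[str, List[str]]
--
-- def load_call_graph(callgraph: List[Tuple[str, str]], mutants: Dict[str, Any]) -> callgraph_type_todo:
--     my_g: callgraph_type_todo = {}
--     called = {}
--
--     for fn_a, fn_b in callgraph:
--         if fn_a not in my_g: my_g[fn_a] = []
--         my_g[fn_a].append(fn_b)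
--         called[fn_b] = True
--
--     # now, populate leaf functions
--     for b in called:
--         if b not in my_g: my_g[b] = []
--
--     unknown_funcs = [uf for uf in mutants.keys() if uf not in my_g]
--     # add unknown functions to callgraph
--     for uf in unknown_funcs:
--         my_g[uf] = []
--
--     # mark all unknown functions as reachable by all
--     for reachable in my_g.values():
--         reachable.extend(unknown_funcs)
--     return my_g
-- ===== SOURCE B (Python) =====
-- def load_call_graph(callgraph, mutants):
--     # nodes in A's order: sources (first occurrence), then new callees, then unknown mutant keys
--     sources = list(dict.fromkeys(s for s, _ in callgraph))
--     callees = [d for d in dict.fromkeys(d for _, d in callgraph) if d not in sources]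
--     known = sources + callees
--     unknown = [m for m in mutants if m not in known]
--     # each node's callees are read off the edge list directly; unknown funcs reachable everywhere
--     return {n: [d for s, d in callgraph if s == n] + unknown
--             for n in known + unknown}
-- ===== Notes on version B (the rewrite author's own statement) =====
-- stated objective: alternative
-- what changed: B abandons A's incrementally mutated dict (per-edge setdefault/append, leaf-population pass, in-place extend of every value): it first computes the ordered node list from deduped sources, new callees and unknown mutant keys, then emits each node's row by filtering its callees directly out of the edge list.
import Mathlib
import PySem

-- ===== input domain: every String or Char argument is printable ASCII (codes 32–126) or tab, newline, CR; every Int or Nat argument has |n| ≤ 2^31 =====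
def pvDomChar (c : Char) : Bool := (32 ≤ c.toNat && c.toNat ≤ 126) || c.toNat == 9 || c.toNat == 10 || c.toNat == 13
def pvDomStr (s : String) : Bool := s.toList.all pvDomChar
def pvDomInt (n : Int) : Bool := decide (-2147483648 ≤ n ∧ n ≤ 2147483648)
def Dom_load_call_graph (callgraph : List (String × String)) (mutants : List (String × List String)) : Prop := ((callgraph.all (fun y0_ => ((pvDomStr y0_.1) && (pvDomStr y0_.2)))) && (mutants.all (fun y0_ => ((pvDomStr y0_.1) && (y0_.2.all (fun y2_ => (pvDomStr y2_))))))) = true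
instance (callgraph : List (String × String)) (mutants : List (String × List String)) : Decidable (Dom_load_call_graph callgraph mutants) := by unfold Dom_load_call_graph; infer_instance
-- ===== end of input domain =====

-- B drops A's incremental dict building entirely: it computes the ordered node list up front
-- (deduped sources, new callees, unknown mutant keys) and reads each node's callees straight
-- off the edge list with a per-node filter (objective: alternative algorithm, no speed claim).

-- ===== PORT A =====
def load_call_graph (callgraph : List (String × String)) (mutants : List (String × List String)) : List (String × List String) :=
  -- first loop: build my_g (adjacency) and called together
  let st := callgraph.foldl
    (fun (st : PySem.Dict String (List String) × PySem.Dict String Bool) e =>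
      let my_g := if st.1.contains e.1 then st.1 else st.1.insert e.1 []
      let my_g := my_g.modify e.1 [] (fun l => l ++ [e.2])   -- my_g[fn_a].append(fn_b)
      (my_g, st.2.insert e.2 true))
    (PySem.Dict.empty, PySem.Dict.empty)
  -- populate leaf functions
  let my_g := st.2.keys.foldl (fun g b => if g.contains b then g else g.insert b ([] : List String)) st.1
  -- unknown functions (mutants.keys() = first-occurrence key list of the dict)
  let unknown_funcs := (PySem.List.dedup (mutants.map (·.1))).filter (fun uf => !my_g.contains uf)
  let my_g := unknown_funcs.foldl (fun g uf => g.insert uf ([] : List String)) my_g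
  -- reachable.extend(unknown_funcs) on every value
  my_g.items.map (fun kv => (kv.1, kv.2 ++ unknown_funcs))

-- ===== PORT B =====
def load_call_graph_alt (callgraph : List (String × String)) (mutants : List (String × List String)) : List (String × List String) :=
  -- dict.fromkeys over the sources / callees = PySem.List.dedup
  let sources := PySem.List.dedup (callgraph.map (·.1))
  let callees := (PySem.List.dedup (callgraph.map (·.2))).filter (fun d => !sources.contains d)
  let known := sources ++ callees
  let unknown := (PySem.List.dedup (mutants.map (·.1))).filter (fun m => !known.contains m)
  -- each node's callees are read straight off the edge list; unknown funcs reachable everywhere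
  (known ++ unknown).map (fun n => (n, (callgraph.filter (fun e => e.1 == n)).map (·.2) ++ unknown))

-- ===== PRECONDITION & SPEC =====
def Spec_load_call_graph (callgraph : List (String × String)) (mutants : List (String × List String)) (out : List (String × List String)) : Prop := out = load_call_graph_alt callgraph mutants
instance (callgraph : List (String × String)) (mutants : List (String × List String)) (out : List (String × List String)) : Decidable (Spec_load_call_graph callgraph mutants out) := by unfold Spec_load_call_graph; infer_instance

-- ===== CLAIM (what is proved, stated in full; the proofs are below) =====
def Claim_equal_load_call_graph : Prop := ∀ (callgraph : List (String × String)) (mutants : List (String × List String)), Dom_load_call_graph callgraph mutants → Spec_load_call_graph callgraph mutants (load_call_graph callgraph mutants)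

-- ===== LEMMAS AND PROOFS =====

/-- The elements a first-occurrence pass appends when `ks` has already been seen. -/
def pvNewOnes : List String → List String → List String
  | [], _ => []
  | b :: ds, ks => if ks.contains b then pvNewOnes ds ks else b :: pvNewOnes ds (ks ++ [b])

theorem pv_contains_keys {ν : Type} (d : PySem.Dict String ν) (k : String) :
    d.contains k = d.keys.contains k := by
  simp [PySem.Dict.contains, PySem.Dict.keys, List.any_eq]

-- A's per-edge update of my_g equals one insert of getD ++ [dst]
theorem pv_stepAB (g : PySem.Dict String (List String)) (e : String × String) :
    ((if g.contains e.1 then g else g.insert e.1 []).modify e.1 [] (fun l => l ++ [e.2]))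
      = g.insert e.1 (g.getD e.1 [] ++ [e.2]) := by
  by_cases h : g.contains e.1 = true
  · simp [h, PySem.Dict.modify]
  · simp only [Bool.not_eq_true] at h
    simp [h, PySem.Dict.modify, PySem.Dict.getD, PySem.Dict.get?_insert_self,
      PySem.Dict.insert_insert_self, (PySem.Dict.get?_eq_none_iff_contains g e.1).mpr h]

-- A's first loop splits into an adjacency fold and the `called` fold
theorem pv_pair_fold (cg : List (String × String)) (g : PySem.Dict String (List String))
    (c : PySem.Dict String Bool) :
    cg.foldl
      (fun (st : PySem.Dict String (List String) × PySem.Dict String Bool) e =>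
        let my_g := if st.1.contains e.1 then st.1 else st.1.insert e.1 []
        let my_g := my_g.modify e.1 [] (fun l => l ++ [e.2])
        (my_g, st.2.insert e.2 true)) (g, c)
      = (cg.foldl (fun d e => d.insert e.1 (d.getD e.1 [] ++ [e.2])) g,
         cg.foldl (fun d e => d.insert e.2 true) c) := by
  induction cg generalizing g c with
  | nil => rfl
  | cons e cg ih =>
    simpa only [List.foldl_cons, pv_stepAB] using
      ih (g.insert e.1 (g.getD e.1 [] ++ [e.2])) (c.insert e.2 true)

-- updating a seen-list is appending the new ones
theorem pv_update_eq_newOnes (ds ks : List String) :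
    PySem.Set.update ks ds = ks ++ pvNewOnes ds ks := by
  induction ds generalizing ks with
  | nil => simp [PySem.Set.update, pvNewOnes]
  | cons b ds ih =>
    by_cases h : b ∈ ks
    · have hadd : PySem.Set.add ks b = ks := by
        simp [PySem.Set.add, PySem.Set.contains, h]
      simpa [PySem.Set.update, pvNewOnes, h, hadd] using ih ks
    · have hadd : PySem.Set.add ks b = ks ++ [b] := by
        simp [PySem.Set.add, PySem.Set.contains, h]
      simpa [PySem.Set.update, pvNewOnes, h, hadd] using ih (ks ++ [b])

theorem pv_newOnes_congr (ds : List String) (ks ks' : List String)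
    (h : ∀ x, x ∈ ks ↔ x ∈ ks') : pvNewOnes ds ks = pvNewOnes ds ks' := by
  induction ds generalizing ks ks' with
  | nil => rfl
  | cons b ds ih =>
    by_cases hb : b ∈ ks
    · have hb' := (h b).mp hb
      simpa [pvNewOnes, hb, hb'] using ih ks ks' h
    · have hb' : b ∉ ks' := fun h' => hb ((h b).mpr h')
      have := ih (ks ++ [b]) (ks' ++ [b]) (by intro x; simp [h x])
      simpa [pvNewOnes, hb, hb'] using this

theorem pv_newOnes_idem (ds : List String) (ks0 ks : List String)
    (hsub : ∀ x, x ∈ ks0 → x ∈ ks) :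
    pvNewOnes (pvNewOnes ds ks0) ks = pvNewOnes ds ks := by
  induction ds generalizing ks0 ks with
  | nil => rfl
  | cons b ds ih =>
    by_cases h0 : b ∈ ks0
    · simpa [pvNewOnes, h0, hsub b h0] using ih ks0 ks hsub
    · by_cases h : b ∈ ks
      · have : pvNewOnes (b :: pvNewOnes ds (ks0 ++ [b])) ks = pvNewOnes ds ks := by
          have hsub' : ∀ x, x ∈ ks0 ++ [b] → x ∈ ks := by
            intro x hx; rcases List.mem_append.mp hx with hx | hx
            · exact hsub x hx
            · simpa using (List.mem_singleton.mp hx ▸ h)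
          simpa [pvNewOnes, h] using ih (ks0 ++ [b]) ks hsub'
        simpa [pvNewOnes, h0, h] using this
      · have hsub' : ∀ x, x ∈ ks0 ++ [b] → x ∈ ks ++ [b] := by
          intro x hx; rcases List.mem_append.mp hx with hx | hx
          · exact List.mem_append.mpr (Or.inl (hsub x hx))
          · exact List.mem_append.mpr (Or.inr hx)
        simpa [pvNewOnes, h0, h] using ih (ks0 ++ [b]) (ks ++ [b]) hsub'

-- filtering a first-occurrence pass by a second seen-list is one pass over both
theorem pv_filter_newOnes (ds : List String) (ks0 ks : List String) :
    (pvNewOnes ds ks0).filter (fun b => !ks.contains b) = pvNewOnes ds (ks0 ++ ks) := by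
  induction ds generalizing ks0 with
  | nil => rfl
  | cons b ds ih =>
    by_cases h0 : b ∈ ks0
    · simpa [pvNewOnes, h0, List.mem_append.mpr (Or.inl h0)] using ih ks0
    · by_cases h : b ∈ ks
      · have hcg : pvNewOnes ds (ks0 ++ b :: ks) = pvNewOnes ds (ks0 ++ ks) := by
          apply pv_newOnes_congr
          intro x; simp only [List.mem_append, List.mem_cons]
          constructor
          · rintro (hx | rfl | hx)
            · exact Or.inl hx
            · exact Or.inr h
            · exact Or.inr hx
          · rintro (hx | hx)
            · exact Or.inl hx
            · exact Or.inr (Or.inr hx)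
        simpa [pvNewOnes, h0, h, List.mem_append, hcg] using ih (ks0 ++ [b])
      · have hcg : pvNewOnes ds (ks0 ++ b :: ks) = pvNewOnes ds (ks0 ++ ks ++ [b]) := by
          apply pv_newOnes_congr
          intro x; simp [List.mem_append, List.mem_cons]; tauto
        simpa [pvNewOnes, h0, h, List.mem_append, hcg] using ih (ks0 ++ [b])

-- fresh elements appended by a first-occurrence pass are not in the seen list
theorem pv_newOnes_fresh (ds ks : List String) (x : String) (hx : x ∈ pvNewOnes ds ks) :
    x ∉ ks := by
  induction ds generalizing ks with
  | nil => simp [pvNewOnes] at hx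
  | cons b ds ih =>
    by_cases h : b ∈ ks
    · exact ih ks (by simpa [pvNewOnes, h] using hx)
    · rcases (by simpa [pvNewOnes, h] using hx : x = b ∨ x ∈ pvNewOnes ds (ks ++ [b])) with hx | hx
      · exact hx ▸ h
      · intro hk; exact ih (ks ++ [b]) hx (List.mem_append.mpr (Or.inl hk))

-- A's leaf loop appends exactly the new keys with empty values
theorem pv_leaf_fold (ds : List String) (g : PySem.Dict String (List String)) :
    (ds.foldl (fun g b => if g.contains b then g else g.insert b ([] : List String)) g).items
      = g.items ++ (pvNewOnes ds g.keys).map (fun b => (b, ([] : List String))) := by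
  induction ds generalizing g with
  | nil => simp [pvNewOnes]
  | cons b ds ih =>
    by_cases h : b ∈ g.keys
    · have hc : g.contains b = true := by
        rw [pv_contains_keys]; exact List.contains_iff_mem.mpr h
      simpa [List.foldl_cons, hc, pvNewOnes, h] using ih g
    · have hc : g.contains b = false := by
        rw [pv_contains_keys]
        exact Bool.not_eq_true _ ▸ (fun hh => h (List.contains_iff_mem.mp hh))
      have hins : (g.insert b ([] : List String)).items = g.items ++ [(b, [])] := by
        simp [PySem.Dict.insert, hc]
      have hkeys : (g.insert b ([] : List String)).keys = g.keys ++ [b] := by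
        simp [PySem.Dict.keys, hins]
      rw [List.foldl_cons]
      simp only [hc, if_neg (by simp : ¬ (false = true))]
      rw [ih (g.insert b [])]
      simp [hins, hkeys, pvNewOnes, h]

-- ===== VERDICT (by name: the statement is the Claim_ definition above) =====
theorem load_call_graph_spec : Claim_equal_load_call_graph := by
  intro cg mu _
  show load_call_graph cg mu = load_call_graph_alt cg mu
  unfold load_call_graph load_call_graph_alt
  simp only [pv_pair_fold]
  set adj := List.foldl (fun (d : PySem.Dict String (List String)) e => d.insert e.1 (d.getD e.1 [] ++ [e.2])) PySem.Dict.empty cg with hadj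
  -- adjacency keys are the deduped sources, values the per-source filtered callees
  have hkeys : adj.keys = PySem.List.dedup (cg.map (·.1)) := by
    rw [hadj, PySem.Dict.keys_foldl_insert_key (κ := String) (ν := List String) cg
      (fun e => e.1) (fun d e => d.getD e.1 [] ++ [e.2]) PySem.Dict.empty]
    rfl
  have hK : adj.keys.Nodup := by
    rw [hadj]
    exact PySem.Dict.nodup_keys_foldl_insert_key (κ := String) (ν := List String) cg
      (fun e => e.1) (fun d e => d.getD e.1 [] ++ [e.2]) PySem.Dict.empty
      (by simp [PySem.Dict.keys, PySem.Dict.empty])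
  have hgetD : ∀ n, adj.getD n [] = (cg.filter (fun e => e.1 == n)).map (·.2) := by
    intro n
    have h := PySem.Dict.getD_foldl_modify_append (κ := String) (β := String)
      (l := cg) (d := PySem.Dict.empty) (c := n)
    simpa [PySem.Dict.modify] using h
  -- the `called` keys are the first-occurrence callee list
  have hcalled : (List.foldl (fun (d : PySem.Dict String Bool) (e : String × String) => d.insert e.2 true) PySem.Dict.empty cg).keys
      = pvNewOnes (cg.map (fun x => x.2)) [] := by
    rw [PySem.Dict.keys_foldl_insert_key (κ := String) (ν := Bool) cg (fun e => e.2) (fun _ _ => true) PySem.Dict.empty]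
    have he : (PySem.Dict.empty : PySem.Dict String Bool).keys = [] := rfl
    rw [he, pv_update_eq_newOnes]
    simp
  rw [hcalled]
  simp only [← hkeys]          -- B's deduped sources are the adjacency keys
  set ds := List.map (fun x : String × String => x.2) cg with hds
  set N := pvNewOnes ds adj.keys with hN
  -- B's new-callee list equals A's leaf additions
  have hBcallees : List.filter (fun d => !adj.keys.contains d) (PySem.List.dedup ds) = N := by
    have hded : PySem.List.dedup ds = pvNewOnes ds [] := by
      show PySem.Set.update [] ds = _
      rw [pv_update_eq_newOnes]; rfl
    rw [hded]
    simpa using pv_filter_newOnes ds [] adj.keys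
  -- A's leaf fold
  set g2 := List.foldl (fun (g : PySem.Dict String (List String)) b => if g.contains b = true then g else g.insert b []) adj (pvNewOnes ds []) with hg2def
  have hg2 : g2.items = adj.items ++ N.map (fun b => (b, ([] : List String))) := by
    rw [hg2def, pv_leaf_fold, pv_newOnes_idem ds [] adj.keys (by simp)]
  have hg2keys : g2.keys = adj.keys ++ N := by
    show g2.items.map Prod.fst = _
    rw [hg2]
    simp [PySem.Dict.keys]
    exact (List.map_congr_left (fun b _ => rfl)).trans (List.map_id N)
  have hg2c : ∀ x, g2.contains x = (adj.keys ++ N).contains x := by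
    intro x; rw [pv_contains_keys, hg2keys]
  simp only [hg2c, hBcallees]
  set U := List.filter (fun uf => !(adj.keys ++ N).contains uf) (PySem.List.dedup (List.map (fun x : String × List String => x.1) mu)) with hU
  have hUfresh : ∀ u ∈ U, (adj.keys ++ N).contains u = false := by
    intro u hu
    have := (List.mem_filter.mp hu).2
    simpa using this
  have hUnotK : ∀ u ∈ U, u ∉ adj.keys := by
    intro u hu hk
    have := hUfresh u hu
    simp at this
    exact this.1 hk
  have hUnodup : U.Nodup := by
    apply List.Nodup.filter
    exact PySem.Set.nodup_ofList _
  have hg3 : (List.foldl (fun (g : PySem.Dict String (List String)) uf => g.insert uf []) g2 U).items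
      = g2.items ++ U.map (fun b => (b, ([] : List String))) := by
    have h := PySem.Dict.items_foldl_insert_fresh (κ := String) (ν := List String) (β := String)
      U (fun a => a) (fun _ => ([] : List String)) g2 ?_ ?_
    · simpa using h
    · intro a ha
      rw [hg2c, hUfresh a ha]
    · simpa using hUnodup
  rw [hg3, hg2]
  -- nodes outside the adjacency keys have no outgoing edges
  have hfilt_nil : ∀ n, n ∉ adj.keys → (cg.filter (fun e => e.1 == n)).map (·.2) = ([] : List String) := by
    intro n hn
    have hfil : cg.filter (fun e => e.1 == n) = [] := by
      apply List.filter_eq_nil_iff.mpr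
      intro e he hne
      apply hn
      rw [hkeys]
      have hm : n ∈ cg.map (·.1) := List.mem_map.mpr ⟨e, he, by simpa using hne⟩
      simpa [PySem.List.mem_dedup] using hm
    simp [hfil]
  rw [PySem.Dict.items_eq_map_keys adj hK []]
  simp only [List.map_append, List.map_map, List.append_assoc]
  congr 1
  · exact List.map_congr_left (fun k _ => by simp only [Function.comp_apply, hgetD k])
  congr 1
  · exact List.map_congr_left (fun n hn => by
      simp only [Function.comp_apply, hfilt_nil n (pv_newOnes_fresh ds adj.keys n (hN ▸ hn)), List.nil_append])
  · exact List.map_congr_left (fun u hu => by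
      simp only [Function.comp_apply, hfilt_nil u (hUnotK u hu), List.nil_append])
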